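-- pv_equiv track=rewrite | github.com/Bmw4134/TRAXOVO_V1 | quantum_search_engine.py | _generate_automation_suggestions
-- ===== SOURCE A (Python) =====
-- from typing import Dict, List, Any, Optional
--
-- def _generate_automation_suggestions(query: str) -> List[Dict[str, str]]:
--     """Generate automation suggestions based on query intent"""
--
--     automation_suggestions = []
--     query_lower = query.lower()
--
--     if any(word in query_lower for word in ["email", "outlook", "gauge", "mail"]):
--         automation_suggestions.append({
--             "title": "GAUGE Email Automation",
--             "description": "Automate GAUGE email processing and report extraction",
--             "action": "setup_gauge_automation",
--             "value": "30+ hours weekly savings"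
--         })
--
--     if any(word in query_lower for word in ["report", "generate", "export", "summary"]):
--         automation_suggestions.append({
--             "title": "Executive Report Generation",
--             "description": "Automated executive summary and board presentation materials",
--             "action": "generate_executive_report",
--             "value": "Board-ready documentation"
--         })
--
--     if any(word in query_lower for word in ["test", "scan", "check", "validate"]):
--         automation_suggestions.append({
--             "title": "Autonomous System Scanning",
--             "description": "Comprehensive system analysis and deployment readiness",
--             "action": "run_autonomous_scan",
--             "value": "Enterprise deployment verification"
--         })
--
--     return automation_suggestions
-- ===== SOURCE B (Python) =====
-- _SUGGESTIONS = [
--     {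
--         "title": "GAUGE Email Automation",
--         "description": "Automate GAUGE email processing and report extraction",
--         "action": "setup_gauge_automation",
--         "value": "30+ hours weekly savings"
--     },
--     {
--         "title": "Executive Report Generation",
--         "description": "Automated executive summary and board presentation materials",
--         "action": "generate_executive_report",
--         "value": "Board-ready documentation"
--     },
--     {
--         "title": "Autonomous System Scanning",
--         "description": "Comprehensive system analysis and deployment readiness",
--         "action": "run_autonomous_scan",
--         "value": "Enterprise deployment verification"
--     },
-- ]
--
-- _KEYWORDS = {
--     "email": 0, "outlook": 0, "gauge": 0, "mail": 0,
--     "report": 1, "generate": 1, "export": 1, "summary": 1,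
--     "test": 2, "scan": 2, "check": 2, "validate": 2,
-- }
--
-- def _generate_automation_suggestions(query):
--     # Single left-to-right scan over the lowered query: at each position,
--     # record which rule any keyword starting there belongs to.
--     q = query.lower()
--     matched = set()
--     for i in range(len(q)):
--         for word, idx in _KEYWORDS.items():
--             if q.startswith(word, i):
--                 matched.add(idx)
--     return [dict(s) for i, s in enumerate(_SUGGESTIONS) if i in matched]
-- ===== Notes on version B (the rewrite author's own statement) =====
-- stated objective: alternative
-- what changed: Instead of running a separate substring search for each keyword group, B makes a single left-to-right scan over the lowered query, checking at each position which keyword starts there (multi-pattern scan) and collecting the set of triggered rule indices, then emits the corresponding suggestion dicts in rule order.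
import Mathlib
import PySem

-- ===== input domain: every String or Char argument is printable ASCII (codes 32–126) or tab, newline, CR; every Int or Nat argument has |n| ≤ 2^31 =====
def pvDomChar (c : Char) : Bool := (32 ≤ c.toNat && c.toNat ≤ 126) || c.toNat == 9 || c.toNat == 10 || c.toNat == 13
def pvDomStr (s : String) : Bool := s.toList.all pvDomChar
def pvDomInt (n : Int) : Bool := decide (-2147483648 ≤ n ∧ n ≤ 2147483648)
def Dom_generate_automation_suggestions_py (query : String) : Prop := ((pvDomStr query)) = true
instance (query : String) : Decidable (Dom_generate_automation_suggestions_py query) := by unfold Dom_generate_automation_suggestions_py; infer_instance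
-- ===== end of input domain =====

-- B replaces A's per-keyword-group substring searches by a single positional scan of the lowered query that collects the set of triggered rule indices; alternative algorithm, same cost.


-- ===== PORT A =====
def generate_automation_suggestions_py (query : String) : List (List (String × String)) :=
  let automation_suggestions : List (List (String × String)) := []
  let query_lower := PySem.Str.lower query
  let automation_suggestions :=
    if ["email", "outlook", "gauge", "mail"].any (fun word => PySem.Str.isIn word query_lower) then
      automation_suggestions ++ [[("title", "GAUGE Email Automation"),
        ("description", "Automate GAUGE email processing and report extraction"),
        ("action", "setup_gauge_automation"),
        ("value", "30+ hours weekly savings")]]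
    else automation_suggestions
  let automation_suggestions :=
    if ["report", "generate", "export", "summary"].any (fun word => PySem.Str.isIn word query_lower) then
      automation_suggestions ++ [[("title", "Executive Report Generation"),
        ("description", "Automated executive summary and board presentation materials"),
        ("action", "generate_executive_report"),
        ("value", "Board-ready documentation")]]
    else automation_suggestions
  let automation_suggestions :=
    if ["test", "scan", "check", "validate"].any (fun word => PySem.Str.isIn word query_lower) then
      automation_suggestions ++ [[("title", "Autonomous System Scanning"),
        ("description", "Comprehensive system analysis and deployment readiness"),
        ("action", "run_autonomous_scan"),
        ("value", "Enterprise deployment verification")]]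
    else automation_suggestions
  automation_suggestions

-- ===== PORT B =====
-- B-side data: the three suggestion dicts, and a flat keyword -> rule-index map
def pvSuggestions : List (List (String × String)) :=
  [[("title", "GAUGE Email Automation"),
    ("description", "Automate GAUGE email processing and report extraction"),
    ("action", "setup_gauge_automation"),
    ("value", "30+ hours weekly savings")],
   [("title", "Executive Report Generation"),
    ("description", "Automated executive summary and board presentation materials"),
    ("action", "generate_executive_report"),
    ("value", "Board-ready documentation")],
   [("title", "Autonomous System Scanning"),
    ("description", "Comprehensive system analysis and deployment readiness"),
    ("action", "run_autonomous_scan"),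
    ("value", "Enterprise deployment verification")]]

def pvKeywords : List (String × Int) :=
  [("email", 0), ("outlook", 0), ("gauge", 0), ("mail", 0),
   ("report", 1), ("generate", 1), ("export", 1), ("summary", 1),
   ("test", 2), ("scan", 2), ("check", 2), ("validate", 2)]

-- inner loop of B: at position i, add the rule index of every keyword starting there
def pvScanPos (qL : List Char) (m : PySem.Set Int) (i : Nat) : PySem.Set Int :=
  pvKeywords.foldl
    (fun m wi => if PySem.Chars.startswith (qL.drop i) wi.1.toList then PySem.Set.add m wi.2 else m) m

-- outer loop of B: scan every position of the lowered query
def pvScan (qL : List Char) : PySem.Set Int :=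
  (List.range qL.length).foldl (pvScanPos qL) PySem.Set.empty

def generate_automation_suggestions_py_alt (query : String) : List (List (String × String)) :=
  let q := PySem.Str.lower query
  let matched := pvScan q.toList
  ((PySem.List.enumerate pvSuggestions).filter (fun p => PySem.Set.contains matched p.1)).map (fun p => p.2)

-- ===== PRECONDITION & SPEC =====
def Spec_generate_automation_suggestions_py (query : String) (out : List (List (String × String))) : Prop := out = generate_automation_suggestions_py_alt query
instance (query : String) (out : List (List (String × String))) : Decidable (Spec_generate_automation_suggestions_py query out) := by unfold Spec_generate_automation_suggestions_py; infer_instance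

-- ===== CLAIM (what is proved, stated in full; the proofs are below) =====
def Claim_equal_generate_automation_suggestions_py : Prop := ∀ (query : String), Dom_generate_automation_suggestions_py query → Spec_generate_automation_suggestions_py query (generate_automation_suggestions_py query)

-- ===== LEMMAS AND PROOFS =====

-- membership in the inner fold
theorem mem_pvScanPos (qL : List Char) (m : PySem.Set Int) (i : Nat) (x : Int) :
    x ∈ pvScanPos qL m i ↔
      x ∈ m ∨ ∃ wi ∈ pvKeywords, PySem.Chars.startswith (qL.drop i) wi.1.toList = true ∧ wi.2 = x := by
  have gen : ∀ (ks : List (String × Int)) (m : PySem.Set Int),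
      x ∈ ks.foldl (fun m wi => if PySem.Chars.startswith (qL.drop i) wi.1.toList then PySem.Set.add m wi.2 else m) m ↔
        x ∈ m ∨ ∃ wi ∈ ks, PySem.Chars.startswith (qL.drop i) wi.1.toList = true ∧ wi.2 = x := by
    intro ks
    induction ks with
    | nil => simp
    | cons hd tl ih =>
      intro m
      simp only [List.foldl_cons, ih, List.mem_cons]
      by_cases h : PySem.Chars.startswith (qL.drop i) hd.1.toList = true
      · simp [h, PySem.Set.mem_add]; tauto
      · simp only [if_neg h]
        constructor
        · rintro (hm | ⟨wi, hwi, hs, hx⟩)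
          · exact Or.inl hm
          · exact Or.inr ⟨wi, Or.inr hwi, hs, hx⟩
        · rintro (hm | ⟨wi, (rfl | hwi), hs, hx⟩)
          · exact Or.inl hm
          · exact absurd hs h
          · exact Or.inr ⟨wi, hwi, hs, hx⟩
  exact gen pvKeywords m

-- membership after scanning all positions
theorem mem_pvScan (qL : List Char) (x : Int) :
    x ∈ pvScan qL ↔
      ∃ i < qL.length, ∃ wi ∈ pvKeywords,
        PySem.Chars.startswith (qL.drop i) wi.1.toList = true ∧ wi.2 = x := by
  have gen : ∀ (l : List Nat) (m : PySem.Set Int),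
      x ∈ l.foldl (pvScanPos qL) m ↔
        x ∈ m ∨ ∃ i ∈ l, ∃ wi ∈ pvKeywords,
          PySem.Chars.startswith (qL.drop i) wi.1.toList = true ∧ wi.2 = x := by
    intro l
    induction l with
    | nil => simp
    | cons hd tl ih =>
      intro m
      simp only [List.foldl_cons, ih, mem_pvScanPos, List.mem_cons]
      constructor
      · rintro ((hm | ⟨wi, hwi, hs, hx⟩) | ⟨i, hi, rest⟩)
        · exact Or.inl hm
        · exact Or.inr ⟨hd, Or.inl rfl, wi, hwi, hs, hx⟩
        · exact Or.inr ⟨i, Or.inr hi, rest⟩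
      · rintro (hm | ⟨i, (rfl | hi), rest⟩)
        · exact Or.inl (Or.inl hm)
        · exact Or.inl (Or.inr rest)
        · exact Or.inr ⟨i, hi, rest⟩
  unfold pvScan
  rw [gen]
  simp [List.mem_range, PySem.Set.empty]

-- every keyword is a nonempty string
theorem pvKeywords_ne_nil : ∀ wi ∈ pvKeywords, wi.1.toList ≠ [] := by decide

-- a keyword of rule x matched somewhere iff it is a substring
theorem mem_pvScan_iff_isIn (qL : List Char) (x : Int) :
    x ∈ pvScan qL ↔ ∃ wi ∈ pvKeywords, PySem.Chars.isIn wi.1.toList qL = true ∧ wi.2 = x := by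
  rw [mem_pvScan]
  constructor
  · rintro ⟨i, _, wi, hwi, hs, hx⟩
    refine ⟨wi, hwi, ?_, hx⟩
    rw [← PySem.Chars.exists_prefix_drop_iff_isIn]
    exact ⟨i, (PySem.Chars.startswith_iff _ _).mp hs⟩
  · rintro ⟨wi, hwi, hin, hx⟩
    obtain ⟨j, hj⟩ := (PySem.Chars.exists_prefix_drop_iff_isIn _ _).mpr hin
    have hlt : j < qL.length := by
      by_contra hge
      rw [List.drop_eq_nil_of_le (Nat.le_of_not_lt hge)] at hj
      exact pvKeywords_ne_nil wi hwi (List.prefix_nil.mp hj)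
    exact ⟨j, hlt, wi, hwi, (PySem.Chars.startswith_iff _ _).mpr hj, hx⟩

-- the three contains facts, as boolean equalities with A's group tests
theorem contains_scan_zero (ql : String) :
    PySem.Set.contains (pvScan ql.toList) 0 =
      ["email", "outlook", "gauge", "mail"].any (fun word => PySem.Str.isIn word ql) := by
  rw [Bool.eq_iff_iff, PySem.Set.contains_iff, mem_pvScan_iff_isIn]
  simp [pvKeywords, PySem.Str.isIn_eq]

theorem contains_scan_one (ql : String) :
    PySem.Set.contains (pvScan ql.toList) 1 =
      ["report", "generate", "export", "summary"].any (fun word => PySem.Str.isIn word ql) := by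
  rw [Bool.eq_iff_iff, PySem.Set.contains_iff, mem_pvScan_iff_isIn]
  simp [pvKeywords, PySem.Str.isIn_eq]

theorem contains_scan_two (ql : String) :
    PySem.Set.contains (pvScan ql.toList) 2 =
      ["test", "scan", "check", "validate"].any (fun word => PySem.Str.isIn word ql) := by
  rw [Bool.eq_iff_iff, PySem.Set.contains_iff, mem_pvScan_iff_isIn]
  simp [pvKeywords, PySem.Str.isIn_eq]

-- ===== VERDICT (by name: the statement is the Claim_ definition above) =====
theorem generate_automation_suggestions_py_spec : Claim_equal_generate_automation_suggestions_py := by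
  intro query _
  unfold Spec_generate_automation_suggestions_py
  unfold generate_automation_suggestions_py generate_automation_suggestions_py_alt
  cases h1 : (["email", "outlook", "gauge", "mail"].any
      (fun word => PySem.Str.isIn word (PySem.Str.lower query))) <;>
    cases h2 : (["report", "generate", "export", "summary"].any
      (fun word => PySem.Str.isIn word (PySem.Str.lower query))) <;>
    cases h3 : (["test", "scan", "check", "validate"].any
      (fun word => PySem.Str.isIn word (PySem.Str.lower query))) <;>
    simp only [pvSuggestions, PySem.List.enumerate_cons, PySem.List.enumerate_nil,
      List.filter_cons, List.filter_nil, zero_add, one_add_one_eq_two,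
      contains_scan_zero, contains_scan_one, contains_scan_two, h1, h2, h3] <;>
    rfl
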